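-- pv_equiv track=rewrite | github.com/domalab/ha-unraid | custom_components/unraid/api/system_operations.py | _parse_sensors_output
-- ===== SOURCE A (Python) =====
-- from typing import Dict, Any, Optional, Protocol
--
-- def _parse_sensors_output(output: str) -> Dict[str, Dict[str, str]]:
--     """Parse the output of the sensors command."""
--     sensors_data = {}
--     current_sensor = None
--     key_counters = {}  # Track duplicate keys per sensor
--
--     for line in output.splitlines():
--         if ':' not in line:
--             current_sensor = line.strip()
--             sensors_data[current_sensor] = {}
--             key_counters[current_sensor] = {}  # Initialize counters for this sensor
--         else:
--             key, value = line.split(':', 1)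
--             key = key.strip()
--             value = value.split('(')[0].strip()
--
--             # Handle duplicate keys by adding a number
--             if key in sensors_data[current_sensor]:
--                 key_counters[current_sensor][key] = key_counters[current_sensor].get(key, 1) + 1
--                 key = f"{key} #{key_counters[current_sensor][key]}"
--
--             sensors_data[current_sensor][key] = value
--
--     return sensors_data
-- ===== SOURCE B (Python) =====
-- def _parse_sensors_output(output: str):
--     """Parse the output of the sensors command.
--
--     Two-phase rewrite: first partition the lines into (sensor, body_lines)
--     blocks, then build each sensor's dict with a per-block duplicate-key
--     counter. Body lines appearing before any header are ignored (the
--     original raises KeyError there).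
--     """
--     blocks = []
--     pending = None
--     for line in output.splitlines():
--         if ':' not in line:
--             if pending is not None:
--                 blocks.append(pending)
--             pending = (line.strip(), [])
--         elif pending is not None:
--             pending[1].append(line)
--     if pending is not None:
--         blocks.append(pending)
--
--     result = {}
--     for name, body in blocks:
--         inner = {}
--         counters = {}
--         for line in body:
--             key, value = line.split(':', 1)
--             key = key.strip()
--             value = value.split('(')[0].strip()
--             if key in inner:
--                 counters[key] = counters.get(key, 1) + 1
--                 key = f"{key} #{counters[key]}"
--             inner[key] = value
--         result[name] = inner
--     return result
-- ===== Notes on version B (the rewrite author's own statement) =====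
-- stated objective: alternative
-- what changed: Replaces A's single pass that mutates global per-sensor dicts (sensors_data / key_counters keyed by the current sensor) with a two-phase decomposition: first partition the lines into (sensor, body_lines) blocks, then build each sensor's dict from its block with a fresh local duplicate-key counter.
-- outside the precondition, e.g. on _parse_sensors_output(':'): A raises KeyError, B returns {}
import Mathlib
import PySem

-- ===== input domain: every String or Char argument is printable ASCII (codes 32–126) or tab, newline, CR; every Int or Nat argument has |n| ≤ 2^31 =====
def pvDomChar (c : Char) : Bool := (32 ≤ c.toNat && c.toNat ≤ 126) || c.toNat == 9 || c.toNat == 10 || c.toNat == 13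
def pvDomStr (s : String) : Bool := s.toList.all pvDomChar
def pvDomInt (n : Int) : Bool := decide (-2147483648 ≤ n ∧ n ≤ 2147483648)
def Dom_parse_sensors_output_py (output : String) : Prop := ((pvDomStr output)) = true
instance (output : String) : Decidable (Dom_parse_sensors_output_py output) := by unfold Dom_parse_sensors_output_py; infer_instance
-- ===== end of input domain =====

-- B parses the sensors output in two phases (partition into blocks, then build each
-- sensor's dict with a local duplicate counter) instead of A's single pass over global
-- per-sensor state dicts; same return value wherever A returns (objective: alternative).

-- ===== PORT A =====
-- key, value = line.split(':', 1); key = key.strip(); value = value.split('(')[0].strip()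
-- (only used on lines containing ':', where split(':', 1) yields exactly two pieces)
def pvA_kv (line : String) : String × String :=
  match PySem.Str.splitMax? line ":" 1 with
  | some (k0 :: v0 :: _) =>
      (PySem.Str.strip k0,
       PySem.Str.strip ((((PySem.Str.split? v0 "(").getD []).headD "")))
  | _ => ("", "")   -- unreachable under the guard ':' in line

def pvA_State : Type :=
  PySem.Dict String (PySem.Dict String String) × Option String ×
    PySem.Dict String (PySem.Dict String Int)

-- one iteration of A's `for line in output.splitlines()` body
def pvA_step (st : pvA_State) (line : String) : pvA_State :=
  if PySem.Str.isIn ":" line = false then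
    let s := PySem.Str.strip line
    (st.1.insert s PySem.Dict.empty, some s, st.2.2.insert s PySem.Dict.empty)
  else
    match st.2.1 with
    | none => st          -- Python raises KeyError here (excluded by Pre_)
    | some cur =>
      match st.1.get? cur, st.2.2.get? cur with
      | some inner, some ctr =>
        let kv := pvA_kv line
        if inner.contains kv.1 then
          let n := ctr.getD kv.1 1 + 1
          (st.1.insert cur (inner.insert (kv.1 ++ " #" ++ PySem.Int.toStr n) kv.2),
           some cur, st.2.2.insert cur (ctr.insert kv.1 n))
        else
          (st.1.insert cur (inner.insert kv.1 kv.2), some cur, st.2.2)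
      | _, _ => st        -- unreachable: current sensor is always a key of both dicts

def parse_sensors_output_py (output : String) : List (String × List (String × String)) :=
  let fin := (PySem.Str.splitlines output).foldl pvA_step
    (PySem.Dict.empty, none, PySem.Dict.empty)
  fin.1.items.map (fun p => (p.1, p.2.items))

-- ===== PORT B =====
def pvB_kv (line : String) : String × String :=
  match PySem.Str.splitMax? line ":" 1 with
  | some (k0 :: v0 :: _) =>
      (PySem.Str.strip k0,
       PySem.Str.strip ((((PySem.Str.split? v0 "(").getD []).headD "")))
  | _ => ("", "")

-- phase 1: partition the lines into (sensor, body_lines) blocks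
def pvB_State : Type := List (String × List String) × Option (String × List String)

def pvB_step1 (st : pvB_State) (line : String) : pvB_State :=
  if PySem.Str.isIn ":" line = false then
    match st.2 with
    | none => (st.1, some (PySem.Str.strip line, []))
    | some p => (st.1 ++ [p], some (PySem.Str.strip line, []))
  else
    match st.2 with
    | none => st                               -- orphan key/value line: ignored
    | some p => (st.1, some (p.1, p.2 ++ [line]))

-- phase 2: one body line into (inner dict, duplicate counters)
def pvB_stepKV (st : PySem.Dict String String × PySem.Dict String Int) (line : String) :
    PySem.Dict String String × PySem.Dict String Int :=
  let kv := pvB_kv line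
  if st.1.contains kv.1 then
    let n := st.2.getD kv.1 1 + 1
    (st.1.insert (kv.1 ++ " #" ++ PySem.Int.toStr n) kv.2, st.2.insert kv.1 n)
  else
    (st.1.insert kv.1 kv.2, st.2)

def pvB_inner (body : List String) : PySem.Dict String String :=
  (body.foldl pvB_stepKV (PySem.Dict.empty, PySem.Dict.empty)).1

def parse_sensors_output_py_alt (output : String) : List (String × List (String × String)) :=
  let st := (PySem.Str.splitlines output).foldl pvB_step1 ([], none)
  let blocks := match st.2 with | none => st.1 | some p => st.1 ++ [p]
  let result := blocks.foldl
    (fun (res : PySem.Dict String (PySem.Dict String String)) blk =>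
      res.insert blk.1 (pvB_inner blk.2))
    PySem.Dict.empty
  result.items.map (fun p => (p.1, p.2.items))

-- ===== PRECONDITION & SPEC =====
-- Pre_ excludes exactly the outputs whose first line already contains ':' — there A
-- raises KeyError (no sensor header has been seen yet); everything else is admitted.
def Pre_parse_sensors_output_py (output : String) : Prop :=
  ((PySem.Str.splitlines output).head?.all
    (fun l => !(PySem.Str.isIn ":" l))) = true
instance (output : String) : Decidable (Pre_parse_sensors_output_py output) := by
  unfold Pre_parse_sensors_output_py; infer_instance

def pvWitness_parse_sensors_output_py : String := "chip0\ntemp1: +40.0 C (high)\ntemp1: 5"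

def Spec_parse_sensors_output_py (output : String)
    (out : List (String × List (String × String))) : Prop :=
  out = parse_sensors_output_py_alt output
instance (output : String) (out : List (String × List (String × String))) :
    Decidable (Spec_parse_sensors_output_py output out) := by
  unfold Spec_parse_sensors_output_py; infer_instance

-- ===== CLAIM (what is proved, stated in full; the proofs are below) =====
def Claim_equal_parse_sensors_output_py : Prop :=
  ∀ (output : String), Dom_parse_sensors_output_py output →
    Pre_parse_sensors_output_py output →
    Spec_parse_sensors_output_py output (parse_sensors_output_py output)

-- ===== LEMMAS AND PROOFS =====

-- the dict A's sensors_data equals after the block list bs and current block (name, body)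
def pvSd (bs : List (String × List String)) (name : String) (body : List String) :
    PySem.Dict String (PySem.Dict String String) :=
  (bs.foldl (fun res blk => res.insert blk.1 (pvB_inner blk.2)) PySem.Dict.empty).insert
    name (pvB_inner body)

def pvCtrOf (body : List String) : PySem.Dict String Int :=
  (body.foldl pvB_stepKV (PySem.Dict.empty, PySem.Dict.empty)).2

def pvKc (bs : List (String × List String)) (name : String) (body : List String) :
    PySem.Dict String (PySem.Dict String Int) :=
  (bs.foldl (fun res blk => res.insert blk.1 (pvCtrOf blk.2)) PySem.Dict.empty).insert
    name (pvCtrOf body)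

theorem pvSd_append (bs : List (String × List String)) (p : String × List String)
    (name : String) (body : List String) :
    pvSd (bs ++ [p]) name body = (pvSd bs p.1 p.2).insert name (pvB_inner body) := by
  simp [pvSd, List.foldl_append]

theorem pvKc_append (bs : List (String × List String)) (p : String × List String)
    (name : String) (body : List String) :
    pvKc (bs ++ [p]) name body = (pvKc bs p.1 p.2).insert name (pvCtrOf body) := by
  simp [pvKc, List.foldl_append]

theorem pvB_inner_append (body : List String) (line : String) :
    pvB_inner (body ++ [line]) =
      (pvB_stepKV (pvB_inner body, pvCtrOf body) line).1 := by
  simp [pvB_inner, pvCtrOf, List.foldl_append]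

theorem pvCtrOf_append (body : List String) (line : String) :
    pvCtrOf (body ++ [line]) =
      (pvB_stepKV (pvB_inner body, pvCtrOf body) line).2 := by
  simp [pvB_inner, pvCtrOf, List.foldl_append]

-- main loop invariant: once a header has been seen, A's fold state is determined by
-- B's phase-1 block state
theorem pvLoop (ls : List String) (bs : List (String × List String))
    (name : String) (body : List String) :
    ∃ (bs' : List (String × List String)) (q : String × List String),
      ls.foldl pvB_step1 (bs, some (name, body)) = (bs', some q) ∧
      ls.foldl pvA_step (pvSd bs name body, some name, pvKc bs name body) =
        (pvSd bs' q.1 q.2, some q.1, pvKc bs' q.1 q.2) := by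
  induction ls generalizing bs name body with
  | nil => exact ⟨bs, (name, body), rfl, rfl⟩
  | cons line ls ih =>
    by_cases h : PySem.Chars.isIn [':'] line.toList = false
    · have hA : pvA_step (pvSd bs name body, some name, pvKc bs name body) line =
          (pvSd (bs ++ [(name, body)]) (PySem.Str.strip line) [],
           some (PySem.Str.strip line),
           pvKc (bs ++ [(name, body)]) (PySem.Str.strip line) []) := by
        simp [pvA_step, h, pvSd_append, pvKc_append]
        rfl
      have hB : pvB_step1 (bs, some (name, body)) line =
          (bs ++ [(name, body)], some (PySem.Str.strip line, [])) := by
        simp [pvB_step1, h]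
      simp only [List.foldl_cons, hA, hB]
      exact ih (bs ++ [(name, body)]) (PySem.Str.strip line) []
    · have h' : PySem.Chars.isIn [':'] line.toList = true := by
        cases hx : PySem.Chars.isIn [':'] line.toList with
        | false => exact absurd hx h
        | true => rfl
      have hget : (pvSd bs name body).get? name = some (pvB_inner body) :=
        PySem.Dict.get?_insert_self _ _ _
      have hgetc : (pvKc bs name body).get? name = some (pvCtrOf body) :=
        PySem.Dict.get?_insert_self _ _ _
      have hkv : pvB_kv line = pvA_kv line := rfl
      have hA : pvA_step (pvSd bs name body, some name, pvKc bs name body) line =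
          (pvSd bs name (body ++ [line]), some name, pvKc bs name (body ++ [line])) := by
        simp only [pvA_step]
        rw [if_neg (by simp [h'])]
        simp only [hget, hgetc]
        rw [show pvSd bs name (body ++ [line]) =
              ((bs.foldl (fun res blk => res.insert blk.1 (pvB_inner blk.2))
                PySem.Dict.empty).insert name (pvB_inner (body ++ [line]))) from rfl,
            show pvKc bs name (body ++ [line]) =
              ((bs.foldl (fun res blk => res.insert blk.1 (pvCtrOf blk.2))
                PySem.Dict.empty).insert name (pvCtrOf (body ++ [line]))) from rfl,
            pvB_inner_append, pvCtrOf_append]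
        simp only [pvB_stepKV, hkv]
        split_ifs with hc
        · simp only [pvSd, pvKc, PySem.Dict.insert_insert_self]
        · simp only [pvSd, pvKc, PySem.Dict.insert_insert_self]
      have hB : pvB_step1 (bs, some (name, body)) line =
          (bs, some (name, body ++ [line])) := by
        simp [pvB_step1, h']
      simp only [List.foldl_cons, hA, hB]
      exact ih bs name (body ++ [line])

-- ===== VERDICT (by name: the statement is the Claim_ definition above) =====
theorem parse_sensors_output_py_spec : Claim_equal_parse_sensors_output_py := by
  intro output _ hpre
  unfold Spec_parse_sensors_output_py
  unfold parse_sensors_output_py parse_sensors_output_py_alt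
  unfold Pre_parse_sensors_output_py at hpre
  cases hls : PySem.Str.splitlines output with
  | nil => simp
  | cons l ls =>
    rw [hls] at hpre
    simp only [List.head?, Option.all] at hpre
    have hl : PySem.Chars.isIn [':'] l.toList = false := by
      cases hx : PySem.Chars.isIn [':'] l.toList with
      | false => rfl
      | true => simp [hx, PySem.Str.isIn] at hpre
    have hA1 : pvA_step (PySem.Dict.empty, none, PySem.Dict.empty) l =
        (pvSd [] (PySem.Str.strip l) [], some (PySem.Str.strip l),
         pvKc [] (PySem.Str.strip l) []) := by
      simp [pvA_step, hl, pvSd, pvKc]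
      rfl
    have hB1 : pvB_step1 ([], none) l = ([], some (PySem.Str.strip l, [])) := by
      simp [pvB_step1, hl]
    simp only [List.foldl_cons, hA1, hB1]
    obtain ⟨bs', q, hB, hA⟩ := pvLoop ls [] (PySem.Str.strip l) []
    rw [hA, hB]
    simp [pvSd, List.foldl_append]
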